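-- pv_equiv track=rewrite | github.com/sandeep3535/learnpython | 01_List.py | count_negative_positive
-- ===== SOURCE A (Python) =====
-- def count_negative_positive(list_l):
--     x = 0
--     y = 0
--     for n in list_l:
--         if n > 0:
--             x += 1
--         else:
--             y += 1
--     return f"Positive = {x} , Negative = {y}"
-- ===== SOURCE B (Python) =====
-- def count_negative_positive(list_l):
--     s = sorted(list_l)
--     y = 0
--     while y < len(s) and s[y] <= 0:
--         y += 1
--     return f"Positive = {len(s) - y} , Negative = {y}"
-- ===== Notes on version B (the rewrite author's own statement) =====
-- stated objective: alternative
-- what changed: B sorts the list and advances a pointer past the non-positive prefix, so the boundary position of the sorted array gives both counts, instead of A's single pass with two if/else counters.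
import Mathlib
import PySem

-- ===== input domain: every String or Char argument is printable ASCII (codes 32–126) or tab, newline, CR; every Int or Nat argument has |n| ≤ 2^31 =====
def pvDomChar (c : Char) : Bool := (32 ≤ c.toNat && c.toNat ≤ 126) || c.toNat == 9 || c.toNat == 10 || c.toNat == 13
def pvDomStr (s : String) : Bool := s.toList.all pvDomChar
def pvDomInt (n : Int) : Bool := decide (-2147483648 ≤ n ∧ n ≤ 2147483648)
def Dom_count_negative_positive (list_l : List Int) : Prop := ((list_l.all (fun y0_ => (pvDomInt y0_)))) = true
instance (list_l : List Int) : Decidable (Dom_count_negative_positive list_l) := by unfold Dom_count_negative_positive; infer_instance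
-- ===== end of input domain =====

-- B sorts the list and walks a pointer past the non-positive prefix (sorted-boundary algorithm)
-- instead of A's one-pass pair of counters; objective: alternative, not faster.

-- ===== PORT A =====
def count_negative_positive (list_l : List Int) : String :=
  let p := list_l.foldl
    (fun (p : Int × Int) n => if n > 0 then (p.1 + 1, p.2) else (p.1, p.2 + 1)) (0, 0)
  "Positive = " ++ PySem.Int.toStr p.1 ++ " , Negative = " ++ PySem.Int.toStr p.2

-- ===== PORT B =====
-- the while loop 'y = 0; while y < len(s) and s[y] <= 0: y += 1' as the obvious
-- structural recursion over the same left-to-right traversal of s, stopping at the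
-- first element > 0
def pvPrefixNonpos : List Int → Int
  | [] => 0
  | n :: t => if n ≤ 0 then 1 + pvPrefixNonpos t else 0

def count_negative_positive_alt (list_l : List Int) : String :=
  let s := PySem.List.sorted list_l (fun x => x) false
  let y := pvPrefixNonpos s
  "Positive = " ++ PySem.Int.toStr ((s.length : Int) - y) ++ " , Negative = " ++ PySem.Int.toStr y

-- ===== PRECONDITION & SPEC =====
def Spec_count_negative_positive (list_l : List Int) (out : String) : Prop := out = count_negative_positive_alt list_l
instance (list_l : List Int) (out : String) : Decidable (Spec_count_negative_positive list_l out) := by unfold Spec_count_negative_positive; infer_instance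

-- ===== CLAIM (what is proved, stated in full; the proofs are below) =====
def Claim_equal_count_negative_positive : Prop := ∀ (list_l : List Int), Dom_count_negative_positive list_l → Spec_count_negative_positive list_l (count_negative_positive list_l)

-- ===== LEMMAS AND PROOFS =====
-- A's fold computes (countP (0 < ·), countP (¬ 0 < ·)) shifted by the accumulator
theorem pvFoldA_eq (l : List Int) (x y : Int) :
    l.foldl (fun (p : Int × Int) n => if n > 0 then (p.1 + 1, p.2) else (p.1, p.2 + 1)) (x, y)
      = (x + (l.countP (fun n => decide (0 < n)) : Int),
         y + (l.countP (fun n => decide (n ≤ 0)) : Int)) := by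
  induction l generalizing x y with
  | nil => simp
  | cons n l ih =>
    simp only [List.foldl, List.countP_cons]
    by_cases h : 0 < n
    · have h' : ¬ n ≤ 0 := by omega
      simp [h, h', ih, Prod.ext_iff]
      ring
    · have h' : n ≤ 0 := by omega
      simp [h, h', ih, Prod.ext_iff]
      ring

-- on a ≤-sorted list the non-positive prefix is exactly all non-positive elements
theorem pvPrefixNonpos_eq_countP (s : List Int) (hs : s.Pairwise (fun a b => a ≤ b)) :
    pvPrefixNonpos s = (s.countP (fun n => decide (n ≤ 0)) : Int) := by
  induction s with
  | nil => simp [pvPrefixNonpos]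
  | cons n t ih =>
    rcases List.pairwise_cons.mp hs with ⟨hn, ht⟩
    by_cases h : n ≤ 0
    · simp [pvPrefixNonpos, h, ih ht]; ring
    · have hz : t.countP (fun n => decide (n ≤ 0)) = 0 := by
        rw [List.countP_eq_zero]
        intro m hm
        have := hn m hm
        simp; omega
      simp [pvPrefixNonpos, h, hz]

theorem pvCount_split (l : List Int) :
    l.countP (fun n => decide (0 < n)) + l.countP (fun n => decide (n ≤ 0)) = l.length := by
  induction l with
  | nil => simp
  | cons n t ih =>
    simp only [List.countP_cons, List.length_cons]
    by_cases h : 0 < n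
    · have h' : ¬ n ≤ 0 := by omega
      simp [h, h']; omega
    · have h' : n ≤ 0 := by omega
      simp [h, h']; omega

-- ===== VERDICT (by name: the statement is the Claim_ definition above) =====
theorem count_negative_positive_spec : Claim_equal_count_negative_positive := by
  intro l _
  unfold Spec_count_negative_positive count_negative_positive count_negative_positive_alt
  dsimp only
  rw [pvFoldA_eq]
  rw [pvPrefixNonpos_eq_countP _ (PySem.List.sorted_pairwise l (fun x => x))]
  have hperm : (PySem.List.sorted l (fun x => x) false).Perm l := PySem.List.sorted_perm l _ _
  rw [hperm.countP_eq, hperm.length_eq]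
  have h := pvCount_split l
  have he : (l.countP (fun n => decide (0 < n)) : Int)
      = (l.length : Int) - (l.countP (fun n => decide (n ≤ 0)) : Int) := by omega
  simp only [zero_add, he]
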